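-- pv_equiv track=rewrite | github.com/Shalini-kp/Text-Recognition | TextRecognition/textDiff.py | repitating_words
-- ===== SOURCE A (Python) =====
-- def repitating_words(wordlist):
--     repItem = []
--     for index, i in enumerate(wordlist):
--         if index > 0:
--             if wordlist[index - 1] == i:
--                 if i not in repItem:
--                     repItem.append(i)
--
--             elif len(wordlist) - 1 > index:
--                 if wordlist[index + 1] == i:
--                     if i not in repItem:
--                         repItem.append(i)
--     return repItem
-- ===== SOURCE B (Python) =====
-- def repitating_words(wordlist):
--     # runs-first two-pointer scan: split the list into maximal runs of equal
--     # adjacent words; a run of length >= 2 yields its word once, in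
--     # first-occurrence order.
--     repItem = []
--     n = len(wordlist)
--     i = 0
--     while i < n:
--         j = i + 1
--         while j < n and wordlist[j] == wordlist[i]:
--             j += 1
--         if j - i >= 2 and wordlist[i] not in repItem:
--             repItem.append(wordlist[i])
--         i = j
--     return repItem
-- ===== Notes on version B (the rewrite author's own statement) =====
-- stated objective: faster
-- what changed: Replaces A's per-index prev/next adjacency tests over enumerate with a runs-first two-pointer scan: advance over each maximal run of equal adjacent words and emit its key once (length >= 2) in first-occurrence order.
import Mathlib
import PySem

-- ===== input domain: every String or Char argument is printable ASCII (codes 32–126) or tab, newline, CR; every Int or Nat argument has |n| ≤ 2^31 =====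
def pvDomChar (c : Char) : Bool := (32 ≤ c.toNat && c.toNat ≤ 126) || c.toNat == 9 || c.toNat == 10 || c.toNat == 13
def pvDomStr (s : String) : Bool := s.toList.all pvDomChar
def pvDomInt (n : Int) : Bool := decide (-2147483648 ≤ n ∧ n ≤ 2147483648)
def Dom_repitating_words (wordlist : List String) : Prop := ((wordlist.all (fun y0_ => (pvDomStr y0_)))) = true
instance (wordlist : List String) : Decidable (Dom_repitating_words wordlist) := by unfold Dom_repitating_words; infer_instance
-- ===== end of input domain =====

-- B replaces A's per-index prev/next adjacency checks with a runs-first two-pointer scan; same results, similar cost.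

-- ===== PORT A =====
-- literal port of A: for index, i in enumerate(wordlist), testing wordlist[index-1] / wordlist[index+1]
def repitating_words (wordlist : List String) : List String :=
  (PySem.List.enumerate wordlist).foldl
    (fun repItem p =>
      let index := p.1
      let i := p.2
      if index > 0 then
        if PySem.List.pyGet? wordlist (index - 1) = some i then
          (if i ∈ repItem then repItem else repItem ++ [i])
        else if (wordlist.length : Int) - 1 > index then
          if PySem.List.pyGet? wordlist (index + 1) = some i then
            (if i ∈ repItem then repItem else repItem ++ [i])
          else repItem
        else repItem
      else repItem) []

-- ===== PORT B =====
-- inner while of Source B: advance j over the copies of x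
def scanRun (wordlist : List String) (x : String) (j : Nat) : Nat :=
  if h : j < wordlist.length then
    if wordlist[j] = x then scanRun wordlist x (j + 1) else j
  else j
termination_by wordlist.length - j

-- termination fact the outer loop's port needs: j never moves backwards
lemma scanRun_ge (wordlist : List String) (x : String) :
    ∀ (k j : Nat), wordlist.length - j ≤ k → j ≤ scanRun wordlist x j := by
  intro k
  induction k with
  | zero =>
    intro j hj
    rw [scanRun, dif_neg (by omega)]
  | succ m ih =>
    intro j hj
    rw [scanRun]
    split
    · split
      · exact Nat.le_trans (Nat.le_succ j) (ih (j + 1) (by omega))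
      · exact le_rfl
    · exact le_rfl

-- outer while of Source B: one maximal run per step
def altGo (wordlist : List String) (repItem : List String) (i : Nat) : List String :=
  if h : i < wordlist.length then
    let j := scanRun wordlist wordlist[i] (i + 1)
    let repItem' := if 2 ≤ j - i ∧ wordlist[i] ∉ repItem then repItem ++ [wordlist[i]] else repItem
    altGo wordlist repItem' j
  else repItem
termination_by wordlist.length - i
decreasing_by
  have := scanRun_ge wordlist wordlist[i] (wordlist.length - (i + 1)) (i + 1) le_rfl
  omega

def repitating_words_alt (wordlist : List String) : List String :=
  altGo wordlist [] 0

-- ===== PRECONDITION & SPEC =====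
def Spec_repitating_words (wordlist : List String) (out : List String) : Prop := out = repitating_words_alt wordlist
instance (wordlist : List String) (out : List String) : Decidable (Spec_repitating_words wordlist out) := by unfold Spec_repitating_words; infer_instance

-- ===== CLAIM (what is proved, stated in full; the proofs are below) =====
def Claim_equal_repitating_words : Prop := ∀ (wordlist : List String), Dom_repitating_words wordlist → Spec_repitating_words wordlist (repitating_words wordlist)

-- ===== LEMMAS AND PROOFS =====

-- "if i not in repItem: repItem.append(i)"
def addNew (acc : List String) (x : String) : List String :=
  if x ∈ acc then acc else acc ++ [x]

lemma addNew_addNew (acc : List String) (x : String) :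
    addNew (addNew acc x) x = addNew acc x := by
  by_cases h : x ∈ acc <;> simp [addNew, h]

-- length of the initial run of x
def runLenB (x : String) : List String → Nat
  | [] => 0
  | y :: ys => if y = x then runLenB x ys + 1 else 0

lemma runLenB_le (x : String) (l : List String) : runLenB x l ≤ l.length := by
  induction l with
  | nil => simp [runLenB]
  | cons y ys ih => simp [runLenB]; split <;> omega

-- structural (suffix-peeling) version of B's outer loop
def runsLoop (repItem : List String) : List String → List String
  | [] => repItem
  | x :: rest =>
    let k := runLenB x rest + 1
    let repItem' := if 2 ≤ k ∧ x ∉ repItem then repItem ++ [x] else repItem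
    runsLoop repItem' ((x :: rest).drop k)
termination_by l => l.length
decreasing_by
  simp only [List.length_drop, List.length_cons]
  have := runLenB_le x rest
  omega

-- scanRun computes: starting index plus the run length of x in the suffix
lemma scanRun_eq (w : List String) (x : String) :
    ∀ (k j : Nat), w.length - j ≤ k → scanRun w x j = j + runLenB x (w.drop j) := by
  intro k
  induction k with
  | zero =>
    intro j hj
    rw [scanRun, dif_neg (by omega), List.drop_eq_nil_of_le (by omega)]
    simp [runLenB]
  | succ m ih =>
    intro j hj
    by_cases h : j < w.length
    · have hdrop : w.drop j = w[j] :: w.drop (j + 1) := List.drop_eq_getElem_cons h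
      rw [scanRun, dif_pos h]
      by_cases he : w[j] = x
      · rw [if_pos he, ih (j + 1) (by omega), hdrop, he]
        simp [runLenB]
        omega
      · rw [if_neg he, hdrop]
        simp [runLenB, he]
    · rw [scanRun, dif_neg h, List.drop_eq_nil_of_le (by omega)]
      simp [runLenB]

-- B's index loop equals the suffix-peeling loop
lemma altGo_eq_runsLoop (w : List String) :
    ∀ (k i : Nat) (rep : List String), w.length - i ≤ k →
      altGo w rep i = runsLoop rep (w.drop i) := by
  intro k
  induction k with
  | zero =>
    intro i rep hi
    rw [altGo, dif_neg (by omega), List.drop_eq_nil_of_le (by omega), runsLoop]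
  | succ m ih =>
    intro i rep hi
    by_cases h : i < w.length
    · have hdrop : w.drop i = w[i] :: w.drop (i + 1) := List.drop_eq_getElem_cons h
      have hscan : scanRun w w[i] (i + 1) = (i + 1) + runLenB w[i] (w.drop (i + 1)) :=
        scanRun_eq w w[i] (w.length - (i + 1)) (i + 1) le_rfl
      rw [altGo, dif_pos h]
      simp only [hscan]
      rw [hdrop]
      simp only [runsLoop]
      have hsub : (i + 1) + runLenB w[i] (w.drop (i + 1)) - i = runLenB w[i] (w.drop (i + 1)) + 1 := by
        omega
      rw [hsub]
      have hdrop2 : (w[i] :: w.drop (i + 1)).drop (runLenB w[i] (w.drop (i + 1)) + 1)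
          = w.drop ((i + 1) + runLenB w[i] (w.drop (i + 1))) := by
        rw [List.drop_succ_cons]
        try rw [List.drop_drop]
        try ring_nf
      rw [hdrop2]
      have hle := runLenB_le w[i] (w.drop (i + 1))
      exact ih _ _ (by simp only [List.length_drop] at hle ⊢; omega)
    · rw [altGo, dif_neg h, List.drop_eq_nil_of_le (by omega), runsLoop]

-- reference recursion: A's per-position decision expressed on (previous word, suffix)
def refA : Option String → List String → List String → List String
  | _, acc, [] => acc
  | none, acc, x :: rest => refA (some x) acc rest
  | some p, acc, x :: rest =>
      if p = x ∨ rest.head? = some x then refA (some x) (addNew acc x) rest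
      else refA (some x) acc rest

lemma refA_none (acc : List String) (x : String) (rest : List String) :
    refA none acc (x :: rest) = refA (some x) acc rest := rfl

lemma refA_cons (p x : String) (acc rest : List String) :
    refA (some p) acc (x :: rest) =
      if p = x ∨ rest.head? = some x then refA (some x) (addNew acc x) rest
      else refA (some x) acc rest := rfl

-- a previous word different from the head is as good as no previous word
lemma refA_shift (p : String) (acc : List String) (z : String) (rest : List String)
    (h : z ≠ p) : refA (some p) acc (z :: rest) = refA none acc (z :: rest) := by
  have hpz : ¬ p = z := fun he => h he.symm
  rw [refA_cons, refA_none]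
  cases rest with
  | nil =>
    rw [if_neg (by simp [hpz])]
  | cons w rest2 =>
    by_cases hw : w = z
    · subst hw
      have hc : p = w ∨ (w :: rest2).head? = some w := Or.inr rfl
      rw [if_pos hc, refA_cons, refA_cons, if_pos (Or.inl rfl),
        if_pos (Or.inl rfl), addNew_addNew]
    · rw [if_neg (by simp [hpz, hw])]

-- consuming a whole run of x adds x once and lands after the run
lemma refA_run (x : String) : ∀ (rest : List String) (acc : List String),
    refA (some x) (addNew acc x) rest =
      refA none (addNew acc x) (rest.drop (runLenB x rest)) := by
  intro rest
  induction rest with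
  | nil => intro acc; simp [refA, runLenB]
  | cons y ys ih =>
    intro acc
    by_cases hy : y = x
    · subst hy
      have h1 : refA (some y) (addNew acc y) (y :: ys)
          = refA (some y) (addNew (addNew acc y) y) ys := by simp [refA]
      rw [h1, addNew_addNew, ih acc]
      simp [runLenB]
    · rw [refA_shift x (addNew acc x) y ys hy]
      simp [runLenB, hy]

-- refA (starting fresh) equals the suffix-peeling loop
lemma refA_eq_runsLoop_aux : ∀ (n : Nat) (l : List String), l.length ≤ n →
    ∀ (acc : List String), refA none acc l = runsLoop acc l := by
  intro n
  induction n with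
  | zero =>
    intro l hl acc
    have : l = [] := List.eq_nil_of_length_eq_zero (Nat.le_zero.mp hl)
    subst this; simp [refA, runsLoop]
  | succ m ih =>
    intro l hl acc
    cases l with
    | nil => simp [refA, runsLoop]
    | cons x rest =>
      simp only [runsLoop]
      by_cases hk : 1 ≤ runLenB x rest
      · -- run length ≥ 2: rest starts with x
        cases rest with
        | nil => simp [runLenB] at hk
        | cons y ys =>
          have hy : y = x := by
            by_contra hne; simp [runLenB, hne] at hk
          subst hy
          have h1 : refA none acc (y :: y :: ys) = refA (some y) (addNew acc y) ys := by
            simp [refA]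
          rw [h1, refA_run]
          have h2 : runLenB y (y :: ys) + 1 = runLenB y ys + 2 := by simp [runLenB]
          have hdrop : ((y :: y :: ys).drop (runLenB y (y :: ys) + 1))
              = ys.drop (runLenB y ys) := by
            rw [h2]; simp [List.drop_succ_cons]
          rw [hdrop]
          have haddNew : (if 2 ≤ runLenB y (y :: ys) + 1 ∧ y ∉ acc then acc ++ [y] else acc)
              = addNew acc y := by
            have hc : 2 ≤ runLenB y (y :: ys) + 1 := by simp [runLenB]
            simp only [addNew]
            by_cases hmem : y ∈ acc <;> simp [hmem, hc]
          rw [haddNew]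
          exact ih (ys.drop (runLenB y ys))
            (by have h3 := runLenB_le y ys
                have h4 : (ys.drop (runLenB y ys)).length ≤ ys.length := by
                  simp [List.length_drop]
                simp only [List.length_cons] at hl
                omega) _
      · -- run length = 1
        have hk0 : runLenB x rest = 0 := by omega
        have hcond : ¬ (2 ≤ runLenB x rest + 1 ∧ x ∉ acc) := by
          rw [hk0]; simp
        rw [if_neg hcond, hk0]
        simp only [List.drop_succ_cons, List.drop_zero]
        have hstep : refA none acc (x :: rest) = refA (some x) acc rest := by simp [refA]
        rw [hstep]
        cases rest with
        | nil => simp [refA, runsLoop]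
        | cons z zs =>
          have hz : z ≠ x := by
            intro h; subst h; simp [runLenB] at hk0
          rw [refA_shift x acc z zs hz]
          exact ih (z :: zs) (by simp only [List.length_cons] at hl ⊢; omega) _

lemma refA_eq_runsLoop (l : List String) (acc : List String) :
    refA none acc l = runsLoop acc l :=
  refA_eq_runsLoop_aux l.length l le_rfl acc

-- A's fold over enumerate, started at offset n, equals refA with the word before position n
lemma foldA_eq_refA (w : List String) : ∀ (l2 : List String) (n : Nat) (acc : List String),
    w.drop n = l2 →
    (PySem.List.enumerate l2 (n : Int)).foldl
      (fun repItem p =>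
        let index := p.1
        let i := p.2
        if index > 0 then
          if PySem.List.pyGet? w (index - 1) = some i then
            (if i ∈ repItem then repItem else repItem ++ [i])
          else if (w.length : Int) - 1 > index then
            if PySem.List.pyGet? w (index + 1) = some i then
              (if i ∈ repItem then repItem else repItem ++ [i])
            else repItem
          else repItem
        else repItem) acc
    = refA (if n = 0 then none else w[n-1]?) acc l2 := by
  intro l2
  induction l2 with
  | nil => intro n acc h; simp [PySem.List.enumerate_nil, refA]
  | cons x l2' ih =>
    intro n acc h
    have hn : n < w.length := by
      by_contra hge
      rw [not_lt] at hge
      rw [List.drop_eq_nil_of_le hge] at h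
      simp at h
    have hx : w[n]? = some x := by
      have : (w.drop n)[0]? = some x := by rw [h]; simp
      rwa [List.getElem?_drop, Nat.add_zero] at this
    have hdrop' : w.drop (n+1) = l2' := by
      have h1 : (w.drop n).drop 1 = l2' := by rw [h]; simp
      rw [List.drop_drop] at h1
      exact h1
    have hnext : w[n+1]? = l2'.head? := by
      have h1 : (w.drop n)[1]? = l2'[0]? := by rw [h]; simp
      rw [List.getElem?_drop] at h1
      rw [h1, List.head?_eq_getElem?]
    rw [PySem.List.enumerate_cons, List.foldl_cons]
    have hstep : ((n : Int) + 1) = ((n + 1 : Nat) : Int) := by push_cast; ring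
    rw [hstep, ih (n+1) _ hdrop']
    simp only [Nat.add_sub_cancel, Nat.succ_ne_zero, if_false, hx]
    by_cases hn0 : n = 0
    · subst hn0
      simp [refA]
    · -- n ≥ 1: previous word exists
      obtain ⟨p, hp⟩ : ∃ p, w[n-1]? = some p := by
        have hlt : n - 1 < w.length := by omega
        exact ⟨w[n-1], List.getElem?_eq_getElem hlt⟩
      rw [if_neg hn0, hp]
      have hidx : ((n : Int) > 0) := by omega
      have hm1 : ((n : Int) - 1) = ((n - 1 : Nat) : Int) := by omega
      have hp1 : ((n : Int) + 1) = ((n + 1 : Nat) : Int) := by omega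
      rw [if_pos hidx, hm1, hp1, PySem.List.pyGet?_natCast, PySem.List.pyGet?_natCast, hp, hnext]
      by_cases hpe : p = x
      · subst hpe
        rw [if_pos rfl, refA_cons, if_pos (Or.inl rfl)]
        simp only [addNew]
      · have hne : ¬ (some p = some x) := by simp [hpe]
        rw [if_neg hne]
        have hlen : ((w.length : Int) - 1 > (n : Int)) ↔ l2' ≠ [] := by
          constructor
          · intro hlt hnil
            subst hnil
            have hlw : w.length = n + 1 := by
              have := congrArg List.length hdrop'
              simp at this
              omega
            omega
          · intro hne'
            have h1 : l2'.length > 0 := List.length_pos_iff.mpr hne'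
            have h2 := congrArg List.length hdrop'
            simp at h2
            omega
        cases l2' with
        | nil =>
          have hngt : ¬ ((w.length : Int) - 1 > (n : Int)) := by
            rw [hlen]; simp
          rw [if_neg hngt, refA_cons,
            if_neg (show ¬ (p = x ∨ ([] : List String).head? = some x) by simp [hpe])]
        | cons z zs =>
          have hgt : ((w.length : Int) - 1 > (n : Int)) := by
            rw [hlen]; simp
          rw [if_pos hgt]
          have hh : (z :: zs).head? = some z := rfl
          rw [hh]
          by_cases hz : z = x
          · subst hz
            rw [if_pos rfl]
            conv_rhs => rw [refA_cons]
            have hc : p = z ∨ (z :: zs).head? = some z := Or.inr rfl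
            rw [if_pos hc]
            simp only [addNew]
          · rw [if_neg (show ¬ (some z = some x) by simp [hz])]
            conv_rhs => rw [refA_cons]
            rw [if_neg (show ¬ (p = x ∨ (z :: zs).head? = some x) by simp [hpe, hz])]

-- ===== VERDICT (by name: the statement is the Claim_ definition above) =====
theorem repitating_words_spec : Claim_equal_repitating_words := by
  intro wordlist _
  unfold Spec_repitating_words repitating_words repitating_words_alt
  have h := foldA_eq_refA wordlist wordlist 0 [] (by simp)
  simp only [Nat.cast_zero] at h
  rw [h, if_pos trivial, altGo_eq_runsLoop wordlist wordlist.length 0 [] (by omega),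
    List.drop_zero]
  exact refA_eq_runsLoop wordlist []
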